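-- pv_equiv track=rewrite | github.com/MuhammadUmerKhan/LexiAgent-Autonomous-Legal-Document-Analysis | clause_extractor.py | merge_clause_chunks
-- ===== SOURCE A (Python) =====
-- from typing import Dict, Optional, List
-- from collections import defaultdict
--
-- def merge_clause_chunks(chunk_outputs: List[Dict[str, str]]) -> Dict[str, str]:
--     final_clauses = defaultdict(str)
--
--     for chunk in chunk_outputs:
--         if not chunk:  # Skip None or empty chunks
--             continue
--         for clause, value in chunk.items():
--             if final_clauses[clause] == "" and value and value != "Not Found":
--                 final_clauses[clause] = value
--
--     # Initialize all required clauses with "Not Found" if missing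
--     required_clauses = [
--         "Termination Clause", "Confidentiality Clause", "Governing Law", "Payment Terms",
--         "Liability Clause", "Force Majeure", "Dispute Resolution", "Indemnification Clause",
--         "Intellectual Property", "Amendment Clause"
--     ]
--     for clause in required_clauses:
--         if clause not in final_clauses or not final_clauses[clause]:
--             final_clauses[clause] = "Not Found"
--
--     return dict(final_clauses)
-- ===== SOURCE B (Python) =====
-- def merge_clause_chunks(chunk_outputs):
--     # Group-by-key decomposition: collect every key in first-seen order,
--     # then pick each key's first valid value by a per-key rescan.
--     seen = set()
--     keys = []
--     for chunk in chunk_outputs: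
--         if not chunk:
--             continue
--         for k in chunk:
--             if k not in seen:
--                 seen.add(k)
--                 keys.append(k)
--
--     def first_valid(k):
--         for chunk in chunk_outputs:
--             if not chunk:
--                 continue
--             v = chunk.get(k)
--             if v and v != "Not Found":
--                 return v
--         return ""
--
--     result = {k: first_valid(k) for k in keys}
--
--     required_clauses = [
--         "Termination Clause", "Confidentiality Clause", "Governing Law", "Payment Terms",
--         "Liability Clause", "Force Majeure", "Dispute Resolution", "Indemnification Clause",
--         "Intellectual Property", "Amendment Clause"
--     ]
--     for c in required_clauses:
--         if not result.get(c):
--             result[c] = "Not Found"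
--     return result
-- ===== Notes on version B (the rewrite author's own statement) =====
-- stated objective: alternative
-- what changed: Inverts the loop nesting: instead of one streaming pass that fills a defaultdict entry by entry, B first collects the set of keys in first-seen order, then for each key rescans the chunks for its first valid value, and finally patches the ten required clauses.
import Mathlib
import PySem

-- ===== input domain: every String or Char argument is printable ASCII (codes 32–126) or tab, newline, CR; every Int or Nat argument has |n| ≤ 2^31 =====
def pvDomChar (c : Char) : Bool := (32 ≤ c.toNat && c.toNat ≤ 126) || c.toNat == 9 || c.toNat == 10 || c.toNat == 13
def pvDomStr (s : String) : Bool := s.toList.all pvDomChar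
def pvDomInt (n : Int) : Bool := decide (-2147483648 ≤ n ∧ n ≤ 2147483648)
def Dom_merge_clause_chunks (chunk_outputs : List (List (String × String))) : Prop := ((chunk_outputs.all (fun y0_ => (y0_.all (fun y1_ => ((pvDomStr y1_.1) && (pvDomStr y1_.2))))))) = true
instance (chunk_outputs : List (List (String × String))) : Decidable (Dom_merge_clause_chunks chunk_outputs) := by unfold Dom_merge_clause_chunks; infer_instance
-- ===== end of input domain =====

-- B replaces A's single streaming defaultdict fill by a group-by-key decomposition (collect every
-- key in first-seen order, then a per-key rescan of the chunks for its first valid value); same cost class.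
-- Each chunk is a Python dict; both ports read it through PySem.Dict.ofList (the dict the caller built).

-- ===== PORT A =====
def mccRequired : List String :=
  ["Termination Clause", "Confidentiality Clause", "Governing Law", "Payment Terms",
   "Liability Clause", "Force Majeure", "Dispute Resolution", "Indemnification Clause",
   "Intellectual Property", "Amendment Clause"]

-- body of A's inner loop; the first `let` is the defaultdict(str) access `final_clauses[clause]`,
-- which inserts "" when the key is absent
def mccStep (d : PySem.Dict String String) (p : String × String) : PySem.Dict String String :=
  let d := if d.contains p.1 then d else d.insert p.1 ""
  if d.getD p.1 "" = "" ∧ p.2 ≠ "" ∧ p.2 ≠ "Not Found" then d.insert p.1 p.2 else d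

def merge_clause_chunks (chunk_outputs : List (List (String × String))) : List (String × String) :=
  let final := chunk_outputs.foldl (fun d chunk =>
    if chunk = [] then d  -- `if not chunk: continue`
    else (PySem.Dict.ofList chunk).items.foldl mccStep d) PySem.Dict.empty
  let final := mccRequired.foldl (fun d c =>
    if ¬ d.contains c ∨ d.getD c "" = "" then d.insert c "Not Found" else d) final
  final.items

-- ===== PORT B =====
-- `first_valid(k)`: value of the first chunk holding a truthy, non-"Not Found" value for k, else ""
def mccFirstValid (chunks : List (List (String × String))) (k : String) : String :=
  match chunks with
  | [] => ""
  | c :: rest =>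
    if c = [] then mccFirstValid rest k
    else match (PySem.Dict.ofList c).get? k with
      | some v => if v ≠ "" ∧ v ≠ "Not Found" then v else mccFirstValid rest k
      | none => mccFirstValid rest k

def merge_clause_chunks_alt (chunk_outputs : List (List (String × String))) : List (String × String) :=
  let keys : PySem.Set String := chunk_outputs.foldl (fun acc chunk =>
    if chunk = [] then acc
    else (PySem.Dict.ofList chunk).keys.foldl (fun acc k => PySem.Set.add acc k) acc) PySem.Set.empty
  let result : PySem.Dict String String :=
    PySem.Dict.mk (keys.map (fun k => (k, mccFirstValid chunk_outputs k)))
  let result := mccRequired.foldl (fun d c =>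
    if d.getD c "" = "" then d.insert c "Not Found" else d) result
  result.items

-- ===== PRECONDITION & SPEC =====
def Spec_merge_clause_chunks (chunk_outputs : List (List (String × String))) (out : List (String × String)) : Prop := out = merge_clause_chunks_alt chunk_outputs
instance (chunk_outputs : List (List (String × String))) (out : List (String × String)) : Decidable (Spec_merge_clause_chunks chunk_outputs out) := by unfold Spec_merge_clause_chunks; infer_instance

-- ===== CLAIM (what is proved, stated in full; the proofs are below) =====
def Claim_equal_merge_clause_chunks : Prop := ∀ (chunk_outputs : List (List (String × String))), Dom_merge_clause_chunks chunk_outputs → Spec_merge_clause_chunks chunk_outputs (merge_clause_chunks chunk_outputs)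

-- ===== LEMMAS AND PROOFS =====

-- the flattened stream of (key, value) pairs A's fill loop processes
def mccStream (chunk_outputs : List (List (String × String))) : List (String × String) :=
  (chunk_outputs.map (fun c => (PySem.Dict.ofList c).items)).flatten

-- "first valid value for k in the stream s, else empty" — the per-key meaning of A's fill loop
def mccFV : List (String × String) → String → String
  | [], _ => ""
  | (k', v) :: t, k => if k' = k ∧ v ≠ "" ∧ v ≠ "Not Found" then v else mccFV t k

theorem mccStep_keys (d : PySem.Dict String String) (p : String × String) :
    (mccStep d p).keys = PySem.Set.add d.keys p.1 := by
  unfold mccStep PySem.Set.add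
  by_cases hc : d.contains p.1 = true
  · have hm : PySem.Set.contains d.keys p.1 = true := by
      simp [PySem.Set.contains, ← PySem.Dict.contains_iff_mem_keys, hc]
    simp only [hc, if_true, hm]
    split
    · exact PySem.Dict.keys_insert_of_contains _ _ hc
    · rfl
  · have hcf : d.contains p.1 = false := by simpa using hc
    have hm : PySem.Set.contains d.keys p.1 = false := by
      simp [PySem.Set.contains, ← PySem.Dict.contains_iff_mem_keys, hcf]
    simp only [hcf, Bool.false_eq_true, if_false, hm]
    have hk1 : (d.insert p.1 "").keys = d.keys ++ [p.1] :=
      PySem.Dict.keys_insert_of_not_contains _ _ hcf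
    split
    · rw [PySem.Dict.keys_insert_of_contains _ _ (PySem.Dict.contains_insert_self _ _ _), hk1]
    · exact hk1

theorem mccStep_getD (d : PySem.Dict String String) (p : String × String) (k : String) :
    (mccStep d p).getD k "" =
      if k = p.1 ∧ d.getD p.1 "" = "" ∧ p.2 ≠ "" ∧ p.2 ≠ "Not Found" then p.2
      else d.getD k "" := by
  unfold mccStep
  by_cases hc : d.contains p.1 = true
  · simp only [hc, if_true]
    split
    · rename_i h
      rw [PySem.Dict.getD_insert]
      by_cases hk : k = p.1 <;> simp [hk, h]
    · rename_i h
      by_cases hk : k = p.1 <;> simp [hk, h]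
  · have hcf : d.contains p.1 = false := by simpa using hc
    have h0 : d.getD p.1 "" = "" := PySem.Dict.getD_of_not_contains _ _ hcf
    have hins : ∀ k', (d.insert p.1 "").getD k' "" = d.getD k' "" := by
      intro k'
      rw [PySem.Dict.getD_insert]
      by_cases hk : k' = p.1 <;> simp [hk, h0]
    simp only [hcf, Bool.false_eq_true, if_false]
    split
    · rename_i h
      rw [hins p.1] at h
      rw [PySem.Dict.getD_insert]
      by_cases hk : k = p.1 <;> simp [hk, h0, h, hins]
    · rename_i h
      rw [hins p.1, h0] at h
      have hcond : ¬ (p.2 ≠ "" ∧ p.2 ≠ "Not Found") := fun hx => h ⟨rfl, hx.1, hx.2⟩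
      by_cases hk : k = p.1 <;> simp [hk, h0, hins, hcond]

theorem mccFold_keys (s : List (String × String)) (d : PySem.Dict String String) :
    (s.foldl mccStep d).keys = (s.map (·.1)).foldl PySem.Set.add d.keys := by
  induction s generalizing d with
  | nil => rfl
  | cons p t ih => simp only [List.foldl_cons, List.map_cons, ih, mccStep_keys]

theorem mccFold_getD (s : List (String × String)) (d : PySem.Dict String String) (k : String) :
    (s.foldl mccStep d).getD k "" =
      if d.getD k "" = "" then mccFV s k else d.getD k "" := by
  induction s generalizing d with
  | nil => by_cases h : d.getD k "" = "" <;> simp [mccFV, h]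
  | cons p t ih =>
    obtain ⟨k', v⟩ := p
    simp only [List.foldl_cons, ih, mccStep_getD, mccFV]
    by_cases hk : k' = k
    · subst hk
      by_cases h0 : d.getD k' "" = ""
      · by_cases hv : v ≠ "" ∧ v ≠ "Not Found"
        · simp [h0, hv]
        · simp [h0, hv]
      · simp [h0]
    · have hk2 : ¬ k = k' := fun h => hk h.symm
      simp [hk, hk2]

theorem mccSetFold_nodup (l : List String) (s : PySem.Set String) (h : s.Nodup) :
    (l.foldl PySem.Set.add s).Nodup := by
  induction l generalizing s with
  | nil => exact h
  | cons x t ih =>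
    refine ih _ ?_
    unfold PySem.Set.add
    split
    · exact h
    · rename_i hc
      have hx : x ∉ s := by simpa [PySem.Set.contains, List.contains_iff_mem] using hc
      exact h.append (List.nodup_singleton x) (by simpa [List.disjoint_singleton] using hx)

theorem mccItems_eq_keys_map (l : List (String × String)) (h : (l.map (·.1)).Nodup) :
    l = (l.map (·.1)).map (fun k => (k, (PySem.Dict.mk l).getD k "")) := by
  induction l with
  | nil => rfl
  | cons p t ih =>
    obtain ⟨k, v⟩ := p
    simp only [List.map_cons, List.nodup_cons] at h ⊢
    congr 1
    · simp [PySem.Dict.getD_eq_get?_getD, PySem.Dict.get?_mk_cons]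
    · conv_lhs => rw [ih h.2]
      apply List.map_congr_left
      intro x hx
      have hne : ¬ (k == x) = true := by
        intro hb; exact h.1 (by rw [eq_of_beq hb]; exact hx)
      simp [PySem.Dict.getD_eq_get?_getD, PySem.Dict.get?_mk_cons, hne]

theorem mccFV_append_not_mem (l rest : List (String × String)) (k : String)
    (h : k ∉ l.map (·.1)) : mccFV (l ++ rest) k = mccFV rest k := by
  induction l with
  | nil => rfl
  | cons p t ih =>
    obtain ⟨k', v⟩ := p
    simp only [List.map_cons, List.mem_cons, not_or] at h
    simp only [List.cons_append, mccFV]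
    rw [if_neg (fun hx => h.1 hx.1.symm)]
    exact ih h.2

theorem mccFV_append_dict (l rest : List (String × String)) (k : String)
    (h : (l.map (·.1)).Nodup) :
    mccFV (l ++ rest) k =
      match (PySem.Dict.mk l).get? k with
      | some v => if v ≠ "" ∧ v ≠ "Not Found" then v else mccFV rest k
      | none => mccFV rest k := by
  induction l with
  | nil => rfl
  | cons p t ih =>
    obtain ⟨k', v⟩ := p
    simp only [List.map_cons, List.nodup_cons] at h
    simp only [List.cons_append, mccFV, PySem.Dict.get?_mk_cons]
    by_cases hk : k' = k
    · subst hk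
      simp only [beq_self_eq_true, if_true]
      by_cases hv : v ≠ "" ∧ v ≠ "Not Found"
      · simp [hv]
      · rw [if_neg (fun hx => hv hx.2 : ¬ (True ∧ v ≠ "" ∧ v ≠ "Not Found")), if_neg hv]
        exact mccFV_append_not_mem t rest k' h.1
    · have hb : (k' == k) = false := by simpa using hk
      have hcond : ¬ (k' = k ∧ v ≠ "" ∧ v ≠ "Not Found") := fun hx => hk hx.1
      simp only [hb, Bool.false_eq_true, if_false, if_neg hcond]
      exact ih h.2

theorem mccFirstValid_eq_FV (chunks : List (List (String × String))) (k : String) :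
    mccFirstValid chunks k = mccFV (mccStream chunks) k := by
  induction chunks with
  | nil => rfl
  | cons c rest ih =>
    have hstream : mccStream (c :: rest) = (PySem.Dict.ofList c).items ++ mccStream rest := by
      simp [mccStream]
    have hnd : ((PySem.Dict.ofList c).items.map (·.1)).Nodup := PySem.Dict.nodup_keys_ofList c
    rw [hstream, mccFV_append_dict _ _ _ hnd]
    unfold mccFirstValid
    by_cases hc : c = []
    · subst hc
      rw [if_pos rfl, ih]
      rfl
    · simp only [hc, if_false, ih]

theorem mccAFold_eq_stream (L : List (List (String × String))) (d : PySem.Dict String String) :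
    L.foldl (fun d chunk => if chunk = [] then d
      else (PySem.Dict.ofList chunk).items.foldl mccStep d) d
    = (mccStream L).foldl mccStep d := by
  induction L generalizing d with
  | nil => rfl
  | cons c rest ih =>
    simp only [List.foldl_cons, mccStream, List.map_cons, List.flatten_cons, List.foldl_append]
    by_cases hc : c = []
    · subst hc
      rw [if_pos rfl, ih]
      rfl
    · rw [if_neg hc, ih]
      rfl

theorem mccBFold_eq_stream (L : List (List (String × String))) (acc : PySem.Set String) :
    L.foldl (fun acc chunk => if chunk = [] then acc
      else (PySem.Dict.ofList chunk).keys.foldl (fun acc k => PySem.Set.add acc k) acc) acc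
    = ((mccStream L).map (·.1)).foldl PySem.Set.add acc := by
  induction L generalizing acc with
  | nil => rfl
  | cons c rest ih =>
    simp only [List.foldl_cons, mccStream, List.map_cons, List.flatten_cons, List.map_append,
      List.foldl_append]
    by_cases hc : c = []
    · subst hc
      rw [if_pos rfl, ih]
      rfl
    · rw [if_neg hc, ih]
      rfl

theorem mccReqStep_eq (d : PySem.Dict String String) (c : String) :
    (if ¬ d.contains c ∨ d.getD c "" = "" then d.insert c "Not Found" else d) =
    (if d.getD c "" = "" then d.insert c "Not Found" else d) := by
  by_cases h0 : d.getD c "" = ""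
  · simp [h0]
  · have hc : d.contains c = true := by
      by_contra hcf
      exact h0 (PySem.Dict.getD_of_not_contains _ _ (by simpa using hcf))
    simp [h0, hc]

-- ===== VERDICT (by name: the statement is the Claim_ definition above) =====
theorem merge_clause_chunks_spec : Claim_equal_merge_clause_chunks := by
  intro chunk_outputs _
  unfold Spec_merge_clause_chunks merge_clause_chunks merge_clause_chunks_alt
  rw [mccAFold_eq_stream, mccBFold_eq_stream]
  show (mccRequired.foldl (fun d c =>
      if ¬ d.contains c ∨ d.getD c "" = "" then d.insert c "Not Found" else d)
      ((mccStream chunk_outputs).foldl mccStep PySem.Dict.empty)).items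
    = (mccRequired.foldl (fun d c =>
      if d.getD c "" = "" then d.insert c "Not Found" else d)
      (PySem.Dict.mk (((((mccStream chunk_outputs).map (·.1)).foldl PySem.Set.add
        PySem.Set.empty)).map (fun k => (k, mccFirstValid chunk_outputs k))))).items
  have hkeys : ((mccStream chunk_outputs).foldl mccStep PySem.Dict.empty).keys
      = ((mccStream chunk_outputs).map (·.1)).foldl PySem.Set.add PySem.Set.empty :=
    mccFold_keys (mccStream chunk_outputs) PySem.Dict.empty
  have hnodup : ((mccStream chunk_outputs).foldl mccStep PySem.Dict.empty).keys.Nodup := by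
    rw [hkeys]; exact mccSetFold_nodup _ _ List.nodup_nil
  have hgetD : ∀ k, ((mccStream chunk_outputs).foldl mccStep PySem.Dict.empty).getD k ""
      = mccFV (mccStream chunk_outputs) k := by
    intro k
    rw [mccFold_getD]
    rfl
  have hitems : ((mccStream chunk_outputs).foldl mccStep PySem.Dict.empty).items
      = (((mccStream chunk_outputs).map (·.1)).foldl PySem.Set.add PySem.Set.empty).map
        (fun k => (k, mccFirstValid chunk_outputs k)) := by
    conv_lhs => rw [mccItems_eq_keys_map _ hnodup]
    have hk' : (((mccStream chunk_outputs).foldl mccStep PySem.Dict.empty).items.map (·.1))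
        = ((mccStream chunk_outputs).map (·.1)).foldl PySem.Set.add PySem.Set.empty := hkeys
    rw [hk']
    exact List.map_congr_left (fun k _ => by
      rw [show (PySem.Dict.mk ((mccStream chunk_outputs).foldl mccStep PySem.Dict.empty).items)
            = (mccStream chunk_outputs).foldl mccStep PySem.Dict.empty from rfl,
         hgetD k, mccFirstValid_eq_FV])
  have hdicts : (PySem.Dict.mk (((((mccStream chunk_outputs).map (·.1)).foldl PySem.Set.add
        PySem.Set.empty)).map (fun k => (k, mccFirstValid chunk_outputs k))) : PySem.Dict String String)
      = (mccStream chunk_outputs).foldl mccStep PySem.Dict.empty := by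
    rw [← hitems]
  rw [hdicts]
  have hfun : (fun (d : PySem.Dict String String) (c : String) =>
      if ¬ d.contains c ∨ d.getD c "" = "" then d.insert c "Not Found" else d)
    = (fun (d : PySem.Dict String String) (c : String) =>
      if d.getD c "" = "" then d.insert c "Not Found" else d) :=
    funext (fun d => funext (fun c => mccReqStep_eq d c))
  rw [hfun]
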